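-- pv_equiv track=rewrite | github.com/jonatanwestholm/exjobb | backblaze.py | product_model_dictionary
-- ===== SOURCE A (Python) =====
-- import collections
--
-- def product_model_dictionary(filenames):
-- 	d = collections.defaultdict(lambda : [0,0])
-- 	for fname in filenames:
-- 		prodname = fname.split('_')[0]
-- 		count = d[prodname]
-- 		count[0] += 1
-- 		if "_fail" in fname:
-- 			count[1] += 1
--
-- 	return d
-- ===== SOURCE B (Python) =====
-- import collections
--
-- def product_model_dictionary(filenames):
-- 	total = collections.Counter(f.split('_')[0] for f in filenames)
-- 	fails = collections.Counter(f.split('_')[0] for f in filenames if "_fail" in f)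
-- 	d = collections.defaultdict(lambda : [0,0])
-- 	for prod, n in total.items():
-- 		d[prod] = [n, fails[prod]]
-- 	return d
-- ===== Notes on version B (the rewrite author's own statement) =====
-- stated objective: alternative
-- what changed: Replaces A's single loop that mutates per-key [count,fail] lists in place by two Counter passes (totals and failures) combined afterwards into the defaultdict.
import Mathlib
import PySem

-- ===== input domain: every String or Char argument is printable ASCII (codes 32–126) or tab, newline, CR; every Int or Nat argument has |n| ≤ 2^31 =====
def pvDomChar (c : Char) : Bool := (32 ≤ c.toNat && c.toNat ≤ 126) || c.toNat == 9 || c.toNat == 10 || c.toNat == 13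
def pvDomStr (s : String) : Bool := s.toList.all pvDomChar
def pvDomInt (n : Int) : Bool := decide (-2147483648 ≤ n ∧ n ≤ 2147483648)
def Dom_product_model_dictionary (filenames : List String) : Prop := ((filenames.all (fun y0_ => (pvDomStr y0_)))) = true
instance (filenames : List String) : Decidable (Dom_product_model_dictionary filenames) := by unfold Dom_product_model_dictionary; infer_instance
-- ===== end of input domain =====

-- B rebuilds the same dict from two Counter passes (totals / failures) instead of
-- A's single loop mutating per-key [count,fail] lists; alternative decomposition, same cost.


-- ===== PORT A =====
-- fname.split('_')[0]: split with the nonempty separator "_" always returns some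
-- nonempty list, so Python's [0] never raises; getD []/headD "" are exactly that value.
def pvPrefix (fname : String) : String := ((PySem.Str.split? fname "_").getD []).headD ""

-- the loop body: count = d[prodname] (defaultdict default [0,0]); count[0] += 1;
-- if "_fail" in fname: count[1] += 1 — the in-place list mutation is the write-back insert
def pvStepA (d : PySem.Dict String (List Int)) (fname : String) : PySem.Dict String (List Int) :=
  d.insert (pvPrefix fname)
    [(d.getD (pvPrefix fname) [0, 0]).getD 0 0 + 1,
     if PySem.Str.isIn "_fail" fname then (d.getD (pvPrefix fname) [0, 0]).getD 1 0 + 1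
     else (d.getD (pvPrefix fname) [0, 0]).getD 1 0]

def product_model_dictionary (filenames : List String) : List (String × List Int) :=
  (filenames.foldl pvStepA PySem.Dict.empty).items

-- ===== PORT B =====
def product_model_dictionary_alt (filenames : List String) : List (String × List Int) :=
  let total : PySem.Dict String Int := PySem.Dict.counter (filenames.map pvPrefix)
  let fails : PySem.Dict String Int :=
    PySem.Dict.counter ((filenames.filter (fun f => PySem.Str.isIn "_fail" f)).map pvPrefix)
  (total.items.foldl
    (fun d kv => d.insert kv.1 [kv.2, fails.getD kv.1 0])
    PySem.Dict.empty).items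

-- ===== PRECONDITION & SPEC =====
def Spec_product_model_dictionary (filenames : List String) (out : List (String × List Int)) : Prop := out = product_model_dictionary_alt filenames
instance (filenames : List String) (out : List (String × List Int)) : Decidable (Spec_product_model_dictionary filenames out) := by unfold Spec_product_model_dictionary; infer_instance

-- ===== CLAIM (what is proved, stated in full; the proofs are below) =====
def Claim_equal_product_model_dictionary : Prop := ∀ (filenames : List String), Dom_product_model_dictionary filenames → Spec_product_model_dictionary filenames (product_model_dictionary filenames)

-- ===== LEMMAS AND PROOFS =====

lemma pvA_getD (fs : List String) (k : String) :
    (fs.foldl pvStepA PySem.Dict.empty).getD k [0, 0] =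
      [((fs.map pvPrefix).count k : Int),
       (((fs.filter (fun f => PySem.Str.isIn "_fail" f)).map pvPrefix).count k : Int)] := by
  induction fs using List.reverseRecOn with
  | nil => simp [PySem.Dict.getD_empty]
  | append_singleton fs f ih =>
      simp only [List.foldl_append, List.foldl_cons, List.foldl_nil, pvStepA,
        PySem.Dict.getD_insert, List.map_append, List.filter_append, List.count_append]
      by_cases hk : k = pvPrefix f
      · subst hk
        simp only [ih, List.getD, List.getElem?_cons_zero, List.getElem?_cons_succ,
          Option.getD_some, List.filter_cons, List.filter_nil, List.map_cons, List.map_nil]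
        split_ifs with hf <;> simp
      · simp only [if_neg hk, ih, List.filter_cons, List.filter_nil, List.map_cons, List.map_nil]
        split_ifs with hf <;> simp [List.count_singleton] <;> exact fun h => hk h.symm

lemma pvA_keys (fs : List String) :
    (fs.foldl pvStepA PySem.Dict.empty).keys = PySem.Set.ofList (fs.map pvPrefix) := by
  rw [show pvStepA = (fun d fname => d.insert (pvPrefix fname)
        [(d.getD (pvPrefix fname) [0, 0]).getD 0 0 + 1,
         if PySem.Str.isIn "_fail" fname then (d.getD (pvPrefix fname) [0, 0]).getD 1 0 + 1
         else (d.getD (pvPrefix fname) [0, 0]).getD 1 0]) from rfl,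
      PySem.Dict.keys_foldl_insert_key]
  simp [PySem.Set.update, PySem.Set.ofList_eq_foldl, PySem.Dict.keys_empty]

lemma pvA_nodup (fs : List String) :
    (fs.foldl pvStepA PySem.Dict.empty).keys.Nodup :=
  PySem.Dict.nodup_keys_foldl_insert_key fs pvPrefix _ _ (by simp [PySem.Dict.keys_empty])

-- ===== VERDICT (by name: the statement is the Claim_ definition above) =====
theorem product_model_dictionary_spec : Claim_equal_product_model_dictionary := by
  intro fs _
  unfold Spec_product_model_dictionary
  have hB : product_model_dictionary_alt fs =
      ((PySem.Dict.counter (fs.map pvPrefix)).items.foldl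
        (fun d kv => d.insert kv.1
          [kv.2, (PySem.Dict.counter ((fs.filter (fun f => PySem.Str.isIn "_fail" f)).map pvPrefix)).getD kv.1 0])
        PySem.Dict.empty).items := rfl
  have hA : product_model_dictionary fs = (fs.foldl pvStepA PySem.Dict.empty).items := rfl
  rw [hA, hB]
  have hF := PySem.Dict.items_foldl_insert_fresh
      ((PySem.Dict.counter (fs.map pvPrefix)).items)
      Prod.fst
      (fun kv => [kv.2, (PySem.Dict.counter ((fs.filter (fun f => PySem.Str.isIn "_fail" f)).map pvPrefix)).getD kv.1 0])
      PySem.Dict.empty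
      (by intro a _; simp [PySem.Dict.contains_empty])
      (by have := PySem.Dict.nodup_keys_counter (xs := fs.map pvPrefix)
          simpa [PySem.Dict.keys] using this)
  rw [hF]
  have hE : (PySem.Dict.empty : PySem.Dict String (List Int)).items = [] := rfl
  rw [PySem.Dict.items_counter, hE, List.nil_append]
  rw [PySem.Dict.items_eq_map_keys _ (pvA_nodup fs) [0, 0], pvA_keys]
  simp only [List.map_map]
  exact List.map_congr_left (fun k _ => by
    simp [pvA_getD, PySem.Dict.getD_counter])
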